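-- pv_equiv track=rewrite | github.com/alchemist009/InterviewCodeProblems | Python/arithmetic_boggle.py | arithmetic_boggle
-- ===== SOURCE A (Python) =====
-- def arithmetic_boggle(magic_number, numbers):
--     # Fill in the code
--     if not numbers:
--         if magic_number == 0:
--             return True
--         else:
--             return False
--     dict1 = {0: 1}
--     for num in numbers:
--         dict2 = {}
--         for curr in dict1:
--             dict2[curr + num] = dict2.get(curr + num, 0) + dict1[curr]
--             dict2[curr - num] = dict2.get(curr - num, 0) + dict1[curr]
--         dict1 = dict2
--
--     if dict1.get(magic_number,0) > 0:
--         return True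
--     else:
--         return False
-- ===== SOURCE B (Python) =====
-- def arithmetic_boggle(magic_number, numbers):
--     def helper(i, acc):
--         if i == len(numbers):
--             return acc == magic_number
--         return helper(i + 1, acc + numbers[i]) or helper(i + 1, acc - numbers[i])
--     return helper(0, 0)
-- ===== Notes on version B (the rewrite author's own statement) =====
-- stated objective: simpler
-- what changed: Replaces the iterative DP over a dict of reachable-sum counts with a direct recursive +/- search over the list (helper(i, acc)); the empty-list case falls out of the base case with no special guard.
import Mathlib
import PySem

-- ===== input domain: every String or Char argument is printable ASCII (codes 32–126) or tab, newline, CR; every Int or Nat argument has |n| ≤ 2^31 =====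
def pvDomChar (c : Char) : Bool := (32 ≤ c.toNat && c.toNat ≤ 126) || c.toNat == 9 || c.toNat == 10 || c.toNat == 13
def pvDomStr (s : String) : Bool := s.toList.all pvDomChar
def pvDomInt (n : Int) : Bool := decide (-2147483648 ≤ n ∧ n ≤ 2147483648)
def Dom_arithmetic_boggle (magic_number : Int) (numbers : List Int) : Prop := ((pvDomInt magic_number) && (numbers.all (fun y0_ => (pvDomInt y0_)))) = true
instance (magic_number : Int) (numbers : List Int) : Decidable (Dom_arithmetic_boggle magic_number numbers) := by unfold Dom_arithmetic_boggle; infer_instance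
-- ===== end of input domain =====

-- B replaces A's dict-based DP over reachable ± sums with a direct recursive ± search; simpler, not faster.


-- ===== PORT A =====
-- inner loop body: dict2[curr+num] = dict2.get(curr+num,0)+dict1[curr]; dict2[curr-num] = dict2.get(curr-num,0)+dict1[curr]
-- (dict1[curr] is read with getD: curr ranges over dict1's keys, so the lookup never fails)
def abStep (d1 : PySem.Dict Int Int) (num : Int) (d2 : PySem.Dict Int Int) (curr : Int) : PySem.Dict Int Int :=
  let d2a := d2.insert (curr + num) (d2.getD (curr + num) 0 + d1.getD curr 0)
  d2a.insert (curr - num) (d2a.getD (curr - num) 0 + d1.getD curr 0)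

-- one iteration of the outer loop: rebuild dict2 from dict1 by iterating over dict1's keys
def abOuter (d1 : PySem.Dict Int Int) (num : Int) : PySem.Dict Int Int :=
  d1.keys.foldl (abStep d1 num) PySem.Dict.empty

def arithmetic_boggle (magic_number : Int) (numbers : List Int) : Bool :=
  if numbers.isEmpty then
    if magic_number = 0 then true else false
  else
    let dict1 := numbers.foldl abOuter (PySem.Dict.empty.insert 0 1)
    if 0 < dict1.getD magic_number 0 then true else false

-- ===== PORT B =====
-- helper(i, acc): recursion on the remaining suffix of numbers (i.e. the index i)
def abHelper (magic_number : Int) : List Int → Int → Bool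
  | [], acc => acc == magic_number
  | n :: rest, acc => abHelper magic_number rest (acc + n) || abHelper magic_number rest (acc - n)

def arithmetic_boggle_alt (magic_number : Int) (numbers : List Int) : Bool :=
  abHelper magic_number numbers 0

-- ===== PRECONDITION & SPEC =====
def Spec_arithmetic_boggle (magic_number : Int) (numbers : List Int) (out : Bool) : Prop := out = arithmetic_boggle_alt magic_number numbers
instance (magic_number : Int) (numbers : List Int) (out : Bool) : Decidable (Spec_arithmetic_boggle magic_number numbers out) := by unfold Spec_arithmetic_boggle; infer_instance

-- ===== CLAIM (what is proved, stated in full; the proofs are below) =====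
def Claim_equal_arithmetic_boggle : Prop := ∀ (magic_number : Int) (numbers : List Int), Dom_arithmetic_boggle magic_number numbers → Spec_arithmetic_boggle magic_number numbers (arithmetic_boggle magic_number numbers)

-- ===== LEMMAS AND PROOFS =====

-- the set of sums reachable from predicate Q after choosing signs for each element of the list
def Reach : List Int → (Int → Prop) → Int → Prop
  | [], Q, k => Q k
  | n :: r, Q, k => Reach r (fun j => ∃ c, Q c ∧ (j = c + n ∨ j = c - n)) k

lemma abStep_getD (d1 : PySem.Dict Int Int) (num : Int) (d2 : PySem.Dict Int Int)
    (curr k : Int) :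
    (abStep d1 num d2 curr).getD k 0 =
      d2.getD k 0 + (if k = curr + num then d1.getD curr 0 else 0)
                  + (if k = curr - num then d1.getD curr 0 else 0) := by
  simp only [abStep, PySem.Dict.getD_insert]
  by_cases h1 : k = curr - num <;> by_cases h2 : k = curr + num <;>
    by_cases h3 : curr - num = curr + num <;> simp_all

lemma inner_fold (d1 : PySem.Dict Int Int) (num : Int) :
    ∀ (ks : List Int) (d2 : PySem.Dict Int Int),
      (∀ k, 0 ≤ d2.getD k 0) → (∀ c ∈ ks, 0 < d1.getD c 0) →
      ∀ k, 0 ≤ (ks.foldl (abStep d1 num) d2).getD k 0 ∧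
        (0 < (ks.foldl (abStep d1 num) d2).getD k 0 ↔
          (0 < d2.getD k 0 ∨ ∃ c ∈ ks, k = c + num ∨ k = c - num)) := by
  intro ks
  induction ks with
  | nil => intro d2 h0 _ k; simpa using (h0 k)
  | cons c rest ih =>
      intro d2 h0 hpos k
      have hstep : ∀ j, 0 ≤ (abStep d1 num d2 c).getD j 0 := by
        intro j; rw [abStep_getD]
        have := h0 j
        have hc : 0 < d1.getD c 0 := hpos c (by simp)
        split_ifs <;> omega
      have hrest : ∀ c' ∈ rest, 0 < d1.getD c' 0 := fun c' hc' => hpos c' (by simp [hc'])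
      obtain ⟨h1, h2⟩ := ih (abStep d1 num d2 c) hstep hrest k
      refine ⟨by simpa using h1, ?_⟩
      simp only [List.foldl_cons] at *
      rw [h2, abStep_getD]
      have hc : 0 < d1.getD c 0 := hpos c (by simp)
      have := h0 k
      constructor
      · rintro (h | ⟨c', hm, hor⟩)
        · split_ifs at h with ha hb hb
          · exact Or.inr ⟨c, by simp, Or.inl ha⟩
          · exact Or.inr ⟨c, by simp, Or.inl ha⟩
          · exact Or.inr ⟨c, by simp, Or.inr hb⟩
          · exact Or.inl (by omega)
        · exact Or.inr ⟨c', by simp [hm], hor⟩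
      · rintro (h | ⟨c', hm, hor⟩)
        · left; split_ifs <;> omega
        · rcases List.mem_cons.mp hm with rfl | hm'
          · left; rcases hor with rfl | rfl <;> (split_ifs <;> omega)
          · exact Or.inr ⟨c', hm', hor⟩

lemma inner_keys (d1 : PySem.Dict Int Int) (num : Int) :
    ∀ (ks : List Int) (d2 : PySem.Dict Int Int) (k : Int),
      k ∈ (ks.foldl (abStep d1 num) d2).keys →
      k ∈ d2.keys ∨ ∃ c ∈ ks, k = c + num ∨ k = c - num := by
  intro ks
  induction ks with
  | nil => intro d2 k h; exact Or.inl h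
  | cons c rest ih =>
      intro d2 k h
      simp only [List.foldl_cons] at h
      rcases ih (abStep d1 num d2 c) k h with h' | ⟨c', hm, hor⟩
      · simp only [abStep, PySem.Dict.mem_keys_insert] at h'
        rcases h' with rfl | rfl | h''
        · exact Or.inr ⟨c, by simp, Or.inr rfl⟩
        · exact Or.inr ⟨c, by simp, Or.inl rfl⟩
        · exact Or.inl h''
      · exact Or.inr ⟨c', by simp [hm], hor⟩

lemma mem_keys_iff_pos (d : PySem.Dict Int Int)
    (hk : ∀ c ∈ d.keys, 0 < d.getD c 0) (c : Int) :
    c ∈ d.keys ↔ 0 < d.getD c 0 := by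
  constructor
  · exact hk c
  · intro h
    by_contra hmem
    cases hct : d.contains c with
    | true => exact hmem ((PySem.Dict.contains_iff_mem_keys d c).mp hct)
    | false =>
        rw [PySem.Dict.getD_of_not_contains d 0 hct] at h
        omega

lemma outer_fold :
    ∀ (l : List Int) (d : PySem.Dict Int Int) (Q : Int → Prop),
      (∀ k, 0 ≤ d.getD k 0) → (∀ k, 0 < d.getD k 0 ↔ Q k) →
      (∀ c ∈ d.keys, 0 < d.getD c 0) →
      ∀ k, 0 < (l.foldl abOuter d).getD k 0 ↔ Reach l Q k := by
  intro l
  induction l with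
  | nil => intro d Q _ hiff _ k; exact hiff k
  | cons n rest ih =>
      intro d Q h0 hiff hkey k
      simp only [List.foldl_cons]
      have hposk : ∀ c ∈ d.keys, 0 < d.getD c 0 := hkey
      have hinner := inner_fold d n d.keys PySem.Dict.empty
        (by intro j; simp [PySem.Dict.getD_empty]) hposk
      have h0' : ∀ j, 0 ≤ (abOuter d n).getD j 0 := by
        intro j; simpa [abOuter] using (hinner j).1
      have hiff' : ∀ j, 0 < (abOuter d n).getD j 0 ↔ ∃ c, Q c ∧ (j = c + n ∨ j = c - n) := by
        intro j
        simp only [abOuter]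
        rw [(hinner j).2]
        simp only [PySem.Dict.getD_empty]
        constructor
        · rintro (h | ⟨c, hm, hor⟩)
          · omega
          · exact ⟨c, (hiff c).mp (hposk c hm), hor⟩
        · rintro ⟨c, hQ, hor⟩
          exact Or.inr ⟨c, (mem_keys_iff_pos d hposk c).mpr ((hiff c).mpr hQ), hor⟩
      have hkey' : ∀ c ∈ (abOuter d n).keys, 0 < (abOuter d n).getD c 0 := by
        intro c hc
        rcases inner_keys d n d.keys PySem.Dict.empty c (by simpa [abOuter] using hc) with h | ⟨c', hm, hor⟩
        · simp [PySem.Dict.keys_empty] at h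
        · exact (hiff' c).mpr ⟨c', (hiff c').mp (hposk c' hm), hor⟩
      exact ih (abOuter d n) _ h0' hiff' hkey' k

lemma reach_helper (m : Int) :
    ∀ (l : List Int) (Q : Int → Prop),
      Reach l Q m ↔ ∃ a, Q a ∧ abHelper m l a = true := by
  intro l
  induction l with
  | nil =>
      intro Q
      simp only [Reach, abHelper, beq_iff_eq]
      constructor
      · intro h; exact ⟨m, h, rfl⟩
      · rintro ⟨a, hQ, rfl⟩; exact hQ
  | cons n rest ih =>
      intro Q
      simp only [Reach]
      rw [ih]
      constructor
      · rintro ⟨a, ⟨c, hQ, hor⟩, hh⟩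
        refine ⟨c, hQ, ?_⟩
        simp only [abHelper, Bool.or_eq_true]
        rcases hor with rfl | rfl
        · exact Or.inl hh
        · exact Or.inr hh
      · rintro ⟨c, hQ, hh⟩
        simp only [abHelper, Bool.or_eq_true] at hh
        rcases hh with hh | hh
        · exact ⟨c + n, ⟨c, hQ, Or.inl rfl⟩, hh⟩
        · exact ⟨c - n, ⟨c, hQ, Or.inr rfl⟩, hh⟩

-- ===== VERDICT (by name: the statement is the Claim_ definition above) =====
theorem arithmetic_boggle_spec : Claim_equal_arithmetic_boggle := by
  intro m numbers _
  unfold Spec_arithmetic_boggle arithmetic_boggle arithmetic_boggle_alt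
  cases numbers with
  | nil =>
      simp only [List.isEmpty_nil, if_true, abHelper]
      rcases eq_or_ne m 0 with rfl | h
      · simp
      · rw [if_neg h]
        symm
        rw [beq_eq_false_iff_ne]
        exact fun e => h e.symm
  | cons n rest =>
      simp only [List.isEmpty_cons, Bool.false_eq_true, if_false]
      have hd0 : ∀ k, (PySem.Dict.empty.insert (0:Int) (1:Int)).getD k 0 = if k = 0 then 1 else 0 := by
        intro k; rw [PySem.Dict.getD_insert]; simp [PySem.Dict.getD_empty]
      have hkeys : (PySem.Dict.empty.insert (0:Int) (1:Int)).keys = [0] := by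
        rw [PySem.Dict.keys_insert_of_not_contains PySem.Dict.empty 1
          (by simp [PySem.Dict.contains_empty])]
        simp [PySem.Dict.keys_empty]
      have houter := outer_fold (n :: rest) (PySem.Dict.empty.insert 0 1) (fun k => k = 0)
        (by intro k; rw [hd0]; split_ifs <;> omega)
        (by intro k; rw [hd0]; split_ifs with h <;> simp [h])
        (by intro c hc; rw [hkeys] at hc; simp at hc; rw [hd0]; simp [hc])
        m
      rw [reach_helper] at houter
      have hex : (∃ a, a = (0:Int) ∧ abHelper m (n :: rest) a = true) ↔
          abHelper m (n :: rest) 0 = true := by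
        constructor
        · rintro ⟨a, rfl, h⟩; exact h
        · intro h; exact ⟨0, rfl, h⟩
      rw [hex] at houter
      by_cases hpos : 0 < ((n :: rest).foldl abOuter (PySem.Dict.empty.insert 0 1)).getD m 0
      · rw [if_pos hpos]
        exact (houter.mp hpos).symm
      · rw [if_neg hpos]
        cases hcase : abHelper m (n :: rest) 0 with
        | false => rfl
        | true => exact absurd (houter.mpr hcase) hpos
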